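-- pv_equiv track=rewrite | github.com/ElenaTchal/Google-Foobar-Challenge | Challenge 2.2 - lovely lambs.py | solution
-- ===== SOURCE A (Python) =====
-- def solution(total_lambs):
--
--   doubledlist = list()
--
--   x = 0
--   runningtotal = 0
--   while x <= total_lambs:
--     currentvalue = 2**x
--     doubledlist.append(currentvalue)
--     runningtotal = runningtotal + currentvalue
--     if runningtotal > total_lambs:
--       break
--     x = x + 1
--
--   fiblist = [1,1]
--   Frunningtotal = 2
--   y = 2
--   while y <= total_lambs:
--     currentvalue2 = fiblist[y-1] + fiblist[y-2]
--     fiblist.append(currentvalue2)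
--     Frunningtotal = Frunningtotal + int(fiblist[y])
--     if Frunningtotal > total_lambs:
--       break
--     y = y + 1
--
--
--   Difference = len(fiblist) - len(doubledlist)
--   return Difference
-- ===== SOURCE B (Python) =====
-- def solution(total_lambs):
--     # doubling count: cumulative 2^0+...+2^x = 2^(x+1)-1, so the count is bit_length(total+1)
--     doubling = (total_lambs + 1).bit_length()
--     count = 2
--     running = 2
--     a, b = 1, 1
--     while running <= total_lambs:
--         a, b = b, a + b
--         running += b
--         count += 1
--     return count - doubling
-- ===== Notes on version B (the rewrite author's own statement) =====
-- stated objective: simpler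
-- what changed: The doubling while-loop and its list are replaced by the closed form bit_length(total_lambs+1), and the Fibonacci loop keeps only the last two values and a count instead of building the whole list.
-- outside the precondition, e.g. on solution(-2): A returns 2, B returns 1
import Mathlib
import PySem

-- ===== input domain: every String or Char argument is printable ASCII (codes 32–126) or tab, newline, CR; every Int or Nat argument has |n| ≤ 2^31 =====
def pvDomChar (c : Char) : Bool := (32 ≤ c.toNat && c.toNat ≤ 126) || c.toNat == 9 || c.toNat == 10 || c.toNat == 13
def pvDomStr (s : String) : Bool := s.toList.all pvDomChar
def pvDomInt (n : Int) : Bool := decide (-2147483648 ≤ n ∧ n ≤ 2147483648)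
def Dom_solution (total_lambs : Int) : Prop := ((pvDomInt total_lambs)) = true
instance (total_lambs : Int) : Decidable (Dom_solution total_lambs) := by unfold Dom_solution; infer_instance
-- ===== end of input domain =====

-- B replaces A's power-doubling loop by the closed form bit_length(total+1) and keeps only the
-- last two Fibonacci values instead of the whole list (objective: simpler).

-- ===== PORT A =====
-- first while-loop of A; the fuel 64 is an upper bound on the iteration count: the loop
-- breaks as soon as the running total 2^(x+1)-1 exceeds total, and on Dom (|total| ≤ 2^31)
-- that happens within 33 iterations
def dblLoopA (total : Int) : Nat → Int → Int → List Int → List Int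
  | 0, _, _, doubledlist => doubledlist
  | fuel+1, x, runningtotal, doubledlist =>
    if x ≤ total then
      -- 2**x; x ≥ 0 in every reachable state, so .toNat is exact
      let currentvalue : Int := 2 ^ x.toNat
      let doubledlist' := doubledlist ++ [currentvalue]
      let runningtotal' := runningtotal + currentvalue
      if runningtotal' > total then doubledlist'
      else dblLoopA total fuel (x+1) runningtotal' doubledlist'
    else doubledlist

-- second while-loop of A; the indices y-1, y-2, y are in range at every reachable state
-- (y = len fiblist), so .getD 0 never substitutes a default; the fuel 64 is an upper bound
-- on the iteration count on Dom: the loop breaks once the running Fibonacci total (which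
-- grows by a factor ≥ 3/2 per iteration from 2) exceeds total
def fibLoopA (total : Int) : Nat → Int → Int → List Int → List Int
  | 0, _, _, fiblist => fiblist
  | fuel+1, y, frt, fiblist =>
    if y ≤ total then
      let currentvalue2 := (PySem.List.pyGet? fiblist (y-1)).getD 0 + (PySem.List.pyGet? fiblist (y-2)).getD 0
      let fiblist' := fiblist ++ [currentvalue2]
      let frt' := frt + (PySem.List.pyGet? fiblist' y).getD 0
      if frt' > total then fiblist'
      else fibLoopA total fuel (y+1) frt' fiblist'
    else fiblist

def solution (total_lambs : Int) : Int :=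
  let doubledlist := dblLoopA total_lambs 64 0 0 []
  let fiblist := fibLoopA total_lambs 64 2 2 [1, 1]
  (fiblist.length : Int) - (doubledlist.length : Int)

-- ===== PORT B =====
-- Python int.bit_length (bit length of |m|), ported by hand as a halving loop;
-- 64 halvings are exact for every |m| < 2^64, which covers all of Dom
def bitLenLoop : Nat → Nat → Nat
  | 0, _ => 0
  | fuel+1, m => if m = 0 then 0 else bitLenLoop fuel (m / 2) + 1

def bitLength (m : Int) : Int := (bitLenLoop 64 m.natAbs : Int)

-- B's while-loop: only (a, b, running, count) are carried
def fibLoopB (total : Int) : Nat → Int → Int → Int → Int → Int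
  | 0, _, _, _, count => count
  | fuel+1, a, b, running, count =>
    if running ≤ total then fibLoopB total fuel b (a+b) (running + (a+b)) (count+1)
    else count

-- fuel 65 = one more than A-side fuel: B's loop needs one extra guard check to exit
def solution_alt (total_lambs : Int) : Int :=
  fibLoopB total_lambs 65 1 1 2 2 - bitLength (total_lambs + 1)

-- ===== PRECONDITION & SPEC =====
-- Pre_ restricts to non-negative lamb totals, the function's natural domain; on negative totals
-- neither of A's loops runs and A returns an accidental constant (the length of the initial Fibonacci list minus zero).
def Pre_solution (total_lambs : Int) : Prop := 0 ≤ total_lambs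
instance (total_lambs : Int) : Decidable (Pre_solution total_lambs) := by unfold Pre_solution; infer_instance

def pvWitness_solution : Int := 7

def Spec_solution (total_lambs : Int) (out : Int) : Prop := out = solution_alt total_lambs
instance (total_lambs : Int) (out : Int) : Decidable (Spec_solution total_lambs out) := by unfold Spec_solution; infer_instance

-- ===== CLAIM (what is proved, stated in full; the proofs are below) =====
def Claim_equal_solution : Prop := ∀ (total_lambs : Int), Dom_solution total_lambs → Pre_solution total_lambs → Spec_solution total_lambs (solution total_lambs)

-- ===== LEMMAS AND PROOFS =====

-- bitLenLoop computes log2+1 on positive inputs below its fuel bound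
lemma bitLenLoop_zero : ∀ f : Nat, bitLenLoop f 0 = 0 := by
  intro f; cases f <;> simp [bitLenLoop]

lemma bitLenLoop_eq : ∀ (f m : Nat), 1 ≤ m → m < 2^f → bitLenLoop f m = Nat.log2 m + 1 := by
  intro f
  induction f with
  | zero => intro m h1 h2; norm_num at h2; omega
  | succ f ih =>
    intro m h1 h2
    rw [bitLenLoop, if_neg (by omega)]
    by_cases hm : m < 2
    · have hm1 : m = 1 := by omega
      subst hm1
      norm_num [bitLenLoop_zero]
      rw [Nat.log2_def]
      norm_num
    · have hdiv : m / 2 < 2^f := by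
        have : (2:Nat)^(f+1) = 2^f * 2 := by ring
        omega
      rw [ih (m/2) (by omega) hdiv]
      conv_rhs => rw [Nat.log2_def]
      rw [if_pos (by omega)]

-- A's doubling loop, entered at state x = c, runningtotal = 2^c - 1, |doubledlist| = c,
-- produces a list of length log2(total+1) + 1; the running total doubles each iteration,
-- so fuel f suffices as soon as total < 2^(c+f) - 1.
lemma dbl_len (total : Int) (h0 : 0 ≤ total) :
    ∀ (f c : Nat) (acc : List Int), acc.length = c →
      (2:Int)^c - 1 ≤ total → total < (2:Int)^(c+f) - 1 →
      (dblLoopA total f (c : Int) ((2:Int)^c - 1) acc).length = Nat.log2 (total.toNat + 1) + 1 := by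
  intro f
  induction f with
  | zero =>
    intro c acc _ hle hf
    rw [Nat.add_zero] at hf
    omega
  | succ f ih =>
    intro c acc hlen hle hf
    have hcpow : (c : Int) ≤ (2:Int)^c - 1 := by
      have := Nat.lt_two_pow_self (n := c)
      have : (c : Int) < (2:Int)^c := by exact_mod_cast this
      omega
    have hguard : (c : Int) ≤ total := le_trans hcpow hle
    rw [dblLoopA]
    simp only [if_pos hguard, Int.toNat_natCast]
    by_cases hbr : (2:Int)^c - 1 + 2^c > total
    · rw [if_pos hbr]
      have h1 : (2:Nat)^c ≤ total.toNat + 1 := by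
        have : (2:Int)^c ≤ total + 1 := by omega
        have h2 : ((2:Nat)^c : Int) = (2:Int)^c := by push_cast; ring
        omega
      have h2 : total.toNat + 1 < (2:Nat)^(c+1) := by
        have : total + 1 < (2:Int)^(c+1) := by
          have : (2:Int)^(c+1) = 2^c * 2 := by ring
          omega
        have h3 : ((2:Nat)^(c+1) : Int) = (2:Int)^(c+1) := by push_cast; ring
        omega
      have hlog : Nat.log2 (total.toNat + 1) = c := by
        rw [Nat.log2_eq_log_two]
        exact Nat.log_eq_of_pow_le_of_lt_pow h1 h2
      simp [hlog, hlen]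
    · rw [if_neg hbr]
      have hle' : (2:Int)^(c+1) - 1 ≤ total := by
        have : (2:Int)^(c+1) = 2^c * 2 := by ring
        omega
      have hf' : total < (2:Int)^(c+1+f) - 1 := by
        have he : c + (f + 1) = c + 1 + f := by omega
        rw [he] at hf
        exact hf
      have := ih (c+1) (acc ++ [2^c]) (by simp [hlen]) hle' hf'
      push_cast at this ⊢
      convert this using 3
      ring

-- A's Fibonacci loop and B's agree: at every reachable loop head y = |fiblist|,
-- a and b are the last two list entries, a ≤ b, y ≤ frt, 2(a+b) ≥ frt+1 (the running total
-- grows by a factor ≥ 3/2 per iteration, whence the exponential fuel bound), and either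
-- this is the initial state (y = frt) or the previous iteration did not break (frt ≤ total).
lemma fib_eq (total : Int) :
    ∀ (f : Nat) (fl : List Int) (a b frt : Int),
      2 ≤ fl.length →
      PySem.List.pyGet? fl ((fl.length : Int) - 2) = some a →
      PySem.List.pyGet? fl ((fl.length : Int) - 1) = some b →
      1 ≤ a → a ≤ b →
      2 * (a + b) ≥ frt + 1 →
      (fl.length : Int) ≤ frt →
      ((fl.length : Int) = frt ∨ frt ≤ total) →
      total * 2^f < frt * 3^f →
      ((fibLoopA total f (fl.length : Int) frt fl).length : Int)
        = fibLoopB total (f+1) a b frt (fl.length : Int) := by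
  intro f
  induction f with
  | zero =>
    intro fl a b frt h2 _ _ _ _ _ _ _ hf
    rw [fibLoopA, fibLoopB]
    norm_num at hf
    rw [if_neg (by omega)]
  | succ f ih =>
    intro fl a b frt h2 hga hgb ha hab hgrow hlf hd hf
    by_cases hrt : frt ≤ total
    · have hguard : (fl.length : Int) ≤ total := le_trans hlf hrt
      rw [fibLoopA, fibLoopB]
      rw [if_pos hguard, if_pos hrt]
      rw [hga, hgb]
      simp only [Option.getD_some]
      rw [add_comm b a]
      have hlast : PySem.List.pyGet? (fl ++ [a + b]) ((fl.length : Int)) = some (a + b) := by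
        have : fl ++ [a + b] = fl ++ (a + b) :: [] := rfl
        rw [this, PySem.List.pyGet?_append_length]
      rw [hlast]
      simp only [Option.getD_some]
      by_cases hbr : frt + (a + b) > total
      · rw [if_pos hbr, fibLoopB, if_neg (by omega)]
        simp
      · rw [if_neg hbr]
        have hlen1 : (fl ++ [a + b]).length = fl.length + 1 := by simp
        have h2' : 2 ≤ (fl ++ [a + b]).length := by rw [hlen1]; omega
        have hE1 : ((fl ++ [a + b]).length : Int) - 2 = ((fl.length - 1 : Nat) : Int) := by
          rw [hlen1]; push_cast; omega
        have hE0 : ((fl.length : Int)) - 1 = ((fl.length - 1 : Nat) : Int) := by omega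
        have hga' : PySem.List.pyGet? (fl ++ [a + b]) (((fl ++ [a + b]).length : Int) - 2) = some b := by
          rw [hE1, PySem.List.pyGet?_natCast, List.getElem?_append_left (by omega)]
          rw [hE0, PySem.List.pyGet?_natCast] at hgb
          exact hgb
        have hgb' : PySem.List.pyGet? (fl ++ [a + b]) (((fl ++ [a + b]).length : Int) - 1) = some (a + b) := by
          have h1 : ((fl ++ [a + b]).length : Int) - 1 = (fl.length : Int) := by
            rw [hlen1]; push_cast; ring
          rw [h1]; exact hlast
        have hf' : total * 2^f < (frt + (a + b)) * 3^f := by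
          have hP3 : (0:Int) < 3^f := by positivity
          have hstep : 2 * (frt + (a + b)) ≥ 3 * frt + 1 := by omega
          have hexp2 : (2:Int)^(f+1) = 2 * 2^f := by ring
          have hexp3 : (3:Int)^(f+1) = 3 * 3^f := by ring
          rw [hexp2, hexp3] at hf
          nlinarith [mul_nonneg (by omega : (0:Int) ≤ 2 * (frt + (a + b)) - 3 * frt - 1) (le_of_lt hP3)]
        have hrec := ih (fl ++ [a + b]) b (a + b) (frt + (a + b)) h2' hga' hgb' (by omega)
          (by omega) (by omega) (by rw [hlen1]; push_cast; omega) (Or.inr (by omega)) hf'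
        rw [hlen1] at hrec
        push_cast at hrec ⊢
        convert hrec using 3
    · have hlen : (fl.length : Int) = frt := by tauto
      rw [fibLoopA, fibLoopB]
      rw [if_neg (by omega), if_neg (by omega)]

-- ===== VERDICT (by name: the statement is the Claim_ definition above) =====
theorem solution_spec : Claim_equal_solution := by
  intro n hdom hpre
  have hpre' : (0:Int) ≤ n := hpre
  have hn : n ≤ 2147483648 := by
    unfold Dom_solution pvDomInt at hdom
    simp at hdom
    exact hdom.2
  have hd := dbl_len n hpre' 64 0 [] rfl (by simpa using hpre') (by norm_num; omega)
  have hf := fib_eq n 64 [1, 1] 1 1 2 (by norm_num) (by decide) (by decide)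
    (by norm_num) (by norm_num) (by norm_num) (by norm_num) (Or.inl (by norm_num))
    (by norm_num; omega)
  have hbl : bitLength (n + 1) = (Nat.log2 (n.toNat + 1) : Int) + 1 := by
    unfold bitLength
    have hab : (n + 1).natAbs = n.toNat + 1 := by omega
    rw [hab, bitLenLoop_eq 64 (n.toNat + 1) (by omega) (by norm_num; omega)]
    push_cast
    ring
  show Spec_solution n (solution n)
  unfold Spec_solution solution solution_alt
  norm_num at hd hf
  rw [hbl]
  show (((fibLoopA n 64 2 2 [1, 1]).length : Int)
      - ((dblLoopA n 64 0 0 []).length : Int))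
      = fibLoopB n 65 1 1 2 2 - ((Nat.log2 (n.toNat + 1) : Int) + 1)
  rw [hd]
  push_cast
  omega
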